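-- pv_equiv track=rewrite | github.com/dradose1-uwyo-cosc/lab-08-Siliconsim | huggins-cosc1010-hw3.py | calc_elapse_days
-- ===== SOURCE A (Python) =====
-- months = ["January", "February", "March", "April", "May", "June", "July", "August", "September", "October", "November", "December"]
--
-- num_days = {
--     "January": 31,
--     "February": 28,
--     "FebruaryLeap": 29,
--     "March": 31,
--     "April": 30,
--     "May": 31,
--     "June": 30,
--     "July": 31,
--     "August": 31,
--     "September": 30,
--     "October": 31,
--     "November": 30,
--     "December": 30
-- }
--
-- def calc_elapse_days(month, day):
--     month_index = months.index(month)
--     total = round(day) - 1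
--     for i in range(month_index):
--         if (month == months[i]):
--             total += day
--         else:
--             total += num_days[months[i]]
--     return total
-- ===== SOURCE B (Python) =====
-- months = ["January", "February", "March", "April", "May", "June", "July", "August", "September", "October", "November", "December"]
--
-- num_days = {
--     "January": 31,
--     "February": 28,
--     "FebruaryLeap": 29,
--     "March": 31,
--     "April": 30,
--     "May": 31,
--     "June": 30,
--     "July": 31,
--     "August": 31,
--     "September": 30,
--     "October": 31,
--     "November": 30,
--     "December": 30
-- }
--
-- # cumulative days before each month, built once at module load
-- _offsets = []
-- _running = 0
-- for _m in months:
--     _offsets.append(_running)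
--     _running += num_days[_m]
--
-- def calc_elapse_days(month, day):
--     return _offsets[months.index(month)] + round(day) - 1
-- ===== Notes on version B (the rewrite author's own statement) =====
-- stated objective: simpler
-- what changed: Replaced the per-call loop that re-sums prior month lengths (with a dead month==months[i] branch) by a module-load prefix-sum table, so the call is a single table lookup plus round(day)-1.
import Mathlib
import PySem

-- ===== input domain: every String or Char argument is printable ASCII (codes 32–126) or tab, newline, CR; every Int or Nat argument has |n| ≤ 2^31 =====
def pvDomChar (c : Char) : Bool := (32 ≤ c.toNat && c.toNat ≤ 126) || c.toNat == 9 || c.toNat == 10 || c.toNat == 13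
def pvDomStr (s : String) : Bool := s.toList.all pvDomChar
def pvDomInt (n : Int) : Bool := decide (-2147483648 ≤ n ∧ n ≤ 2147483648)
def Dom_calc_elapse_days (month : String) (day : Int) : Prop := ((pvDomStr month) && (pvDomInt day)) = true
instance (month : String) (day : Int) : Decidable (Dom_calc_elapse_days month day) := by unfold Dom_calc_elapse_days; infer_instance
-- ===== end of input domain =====

-- B replaces A's per-call summation loop by a prefix-sum table built once; objective: simpler (O(1) lookup per call).
-- ===== PORT A =====
def pvMonths : List String := ["January", "February", "March", "April", "May", "June", "July", "August", "September", "October", "November", "December"]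

def pvNumDays : PySem.Dict String Int := PySem.Dict.ofList
  [("January", 31), ("February", 28), ("FebruaryLeap", 29), ("March", 31), ("April", 30),
   ("May", 31), ("June", 30), ("July", 31), ("August", 31), ("September", 30),
   ("October", 31), ("November", 30), ("December", 30)]

-- months.index(month) raises ValueError on an unknown month: excluded by Pre_; the port returns 0 there.
def calc_elapse_days (month : String) (day : Int) : Int :=
  match PySem.List.index? pvMonths month with
  | none => 0
  | some mi =>
    (PySem.List.pyRange 0 mi 1).foldl (fun total i =>
      if month == (PySem.List.pyGet? pvMonths i).getD "" then total + day
      else total + PySem.Dict.getD pvNumDays ((PySem.List.pyGet? pvMonths i).getD "") 0)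
      (day - 1)

-- ===== PORT B =====
-- prefix sums built once from pvMonths/pvNumDays, as in Source B's module-load loop
def pvOffsets : List Int :=
  (pvMonths.foldl (fun (p : List Int × Int) m =>
      (p.1 ++ [p.2], p.2 + PySem.Dict.getD pvNumDays m 0)) ([], 0)).1

def calc_elapse_days_alt (month : String) (day : Int) : Int :=
  match PySem.List.index? pvMonths month with
  | none => 0
  | some mi => (PySem.List.pyGet? pvOffsets mi).getD 0 + day - 1

-- ===== PRECONDITION & SPEC =====
-- A raises ValueError (months.index) on a month not in the list; Pre_ admits exactly the twelve month names.
def Pre_calc_elapse_days (month : String) (day : Int) : Prop := month ∈ pvMonths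
instance (month : String) (day : Int) : Decidable (Pre_calc_elapse_days month day) := by unfold Pre_calc_elapse_days; infer_instance
def pvWitness_calc_elapse_days : String × Int := ("March", 15)

def Spec_calc_elapse_days (month : String) (day : Int) (out : Int) : Prop := out = calc_elapse_days_alt month day
instance (month : String) (day : Int) (out : Int) : Decidable (Spec_calc_elapse_days month day out) := by unfold Spec_calc_elapse_days; infer_instance

-- ===== CLAIM (what is proved, stated in full; the proofs are below) =====
def Claim_equal_calc_elapse_days : Prop := ∀ (month : String) (day : Int), Dom_calc_elapse_days month day → Pre_calc_elapse_days month day → Spec_calc_elapse_days month day (calc_elapse_days month day)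

-- ===== LEMMAS AND PROOFS =====

-- ===== VERDICT (by name: the statement is the Claim_ definition above) =====
theorem calc_elapse_days_spec : Claim_equal_calc_elapse_days := by
  intro month day _ hpre
  unfold Pre_calc_elapse_days pvMonths at hpre
  unfold Spec_calc_elapse_days
  simp only [List.mem_cons, List.not_mem_nil, or_false] at hpre
  rcases hpre with h | h | h | h | h | h | h | h | h | h | h | h <;> subst h <;>
    simp [calc_elapse_days, calc_elapse_days_alt, pvMonths, pvNumDays, pvOffsets,
      PySem.List.index?, PySem.List.pyRange, PySem.List.pyGet?, PySem.List.pyIdx?,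
      PySem.Dict.getD, PySem.Dict.get?, PySem.Dict.ofList, List.idxOf?, List.findIdx?,
      List.findIdx?.go, List.range, List.range.loop, List.foldl] <;> omega
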